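-- pv_equiv track=rewrite | github.com/peter-as/advent-of-code | 2015/03.py | houses
-- ===== SOURCE A (Python) =====
-- def houses(instructions: str) -> set[(int, int)]:
--     """
--     Calculates coordinates of houses visited by following the instructions
--
--     Args:
--         instructions: String containing the instructions to follow
--
--     Returns:
--         Set containing the coordinates of the visited houses
--     """
--     locations = set()
--     locations.add((0, 0))
--     x, y = 0, 0
--     for i in instructions:
--         if i == '^':
--             y += 1
--         elif i == 'v':
--             y -= 1
--         elif i == '<':
--             x -= 1
--         elif i == '>':
--             x += 1
--         locations.add((x, y))
--     return locations
-- ===== SOURCE B (Python) =====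
-- def houses(instructions: str) -> set[(int, int)]:
--     """Divide and conquer: the visited positions of a string are the positions
--     of its left half followed by the positions of its right half translated by
--     the left half's total displacement.  The recursion bottoms out at single
--     characters, whose displacement is computed arithmetically."""
--     return set([(0, 0)] + _rel(instructions))
--
--
-- def _rel(s):
--     """Positions after each step, relative to the starting point (origin
--     excluded).  len(s) positions; the last one is s's total displacement."""
--     if len(s) == 0:
--         return []
--     if len(s) == 1:
--         return [_delta(s)]
--     mid = len(s) // 2
--     left = _rel(s[:mid])
--     right = _rel(s[mid:])
--     tx, ty = left[-1]
--     return left + [(x + tx, y + ty) for x, y in right]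
--
--
-- def _delta(c):
--     return ((c == '>') - (c == '<'), (c == '^') - (c == 'v'))
-- ===== Notes on version B (the rewrite author's own statement) =====
-- stated objective: alternative
-- what changed: Replaces A's single left-to-right mutate-and-insert loop by a divide-and-conquer recursion: the relative path of a string is the path of its left half followed by the path of its right half translated by the left half's total displacement, with arithmetic per-character deltas at the leaves and one final set() dedup.
import Mathlib
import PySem

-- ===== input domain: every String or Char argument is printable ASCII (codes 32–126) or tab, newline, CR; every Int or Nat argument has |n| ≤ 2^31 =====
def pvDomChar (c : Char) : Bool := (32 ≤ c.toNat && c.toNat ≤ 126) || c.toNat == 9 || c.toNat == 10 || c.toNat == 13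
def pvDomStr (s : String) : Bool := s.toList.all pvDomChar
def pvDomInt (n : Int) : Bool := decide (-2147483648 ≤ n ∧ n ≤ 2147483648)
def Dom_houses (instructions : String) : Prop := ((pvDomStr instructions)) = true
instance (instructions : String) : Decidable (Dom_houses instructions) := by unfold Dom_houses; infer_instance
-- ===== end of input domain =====

-- B replaces A's single mutate-and-insert loop by a divide-and-conquer recursion on the string (alternative, not faster).

-- ===== PORT A =====
def houses (instructions : String) : List (Int × Int) :=
  (instructions.toList.foldl
    (fun (st : PySem.Set (Int × Int) × Int × Int) i =>
      let x := st.2.1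
      let y := st.2.2
      let xy : Int × Int :=
        if i = '^' then (x, y + 1)
        else if i = 'v' then (x, y - 1)
        else if i = '<' then (x - 1, y)
        else if i = '>' then (x + 1, y)
        else (x, y)
      (PySem.Set.add st.1 xy, xy))
    (PySem.Set.add PySem.Set.empty ((0 : Int), (0 : Int)), (0 : Int), (0 : Int))).1

-- ===== PORT B =====
-- helper _delta(c): ((c=='>')-(c=='<'), (c=='^')-(c=='v'))
def pvDeltaB (c : Char) : Int × Int :=
  ((if c = '>' then (1 : Int) else 0) - (if c = '<' then (1 : Int) else 0),
   (if c = '^' then (1 : Int) else 0) - (if c = 'v' then (1 : Int) else 0))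

-- helper _rel(s): divide and conquer on the character list (s[:mid]/s[mid:] = take/drop)
def pvRelB (l : List Char) : List (Int × Int) :=
  if l.length = 0 then []
  else if _h1 : l.length = 1 then
    match l with
    | [c] => [pvDeltaB c]
    | [] => []            -- unreachable (length = 1)
    | _ :: _ :: _ => []   -- unreachable (length = 1)
  else
    let mid := l.length / 2
    let left := pvRelB (l.take mid)
    let right := pvRelB (l.drop mid)
    let t := PySem.List.pyGetD left (-1) (0, 0)   -- left[-1]; left is nonempty
    left ++ right.map (fun q => (q.1 + t.1, q.2 + t.2))
termination_by l.length
decreasing_by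
  · simp only [List.length_take]; omega
  · simp only [List.length_drop]; omega

def houses_alt (instructions : String) : List (Int × Int) :=
  PySem.Set.ofList (((0 : Int), (0 : Int)) :: pvRelB instructions.toList)

-- ===== PRECONDITION & SPEC =====
def Spec_houses (instructions : String) (out : List (Int × Int)) : Prop := out = houses_alt instructions
instance (instructions : String) (out : List (Int × Int)) : Decidable (Spec_houses instructions out) := by unfold Spec_houses; infer_instance

-- ===== CLAIM (what is proved, stated in full; the proofs are below) =====
def Claim_equal_houses : Prop := ∀ (instructions : String), Dom_houses instructions → Spec_houses instructions (houses instructions)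

-- ===== LEMMAS AND PROOFS =====

/-- Absolute positions after each step, starting from (but excluding) `p`. -/
def pvPathFrom (p : Int × Int) : List (Int × Int) → List (Int × Int)
  | [] => []
  | d :: ds => (p.1 + d.1, p.2 + d.2) :: pvPathFrom (p.1 + d.1, p.2 + d.2) ds

/-- Endpoint of a displacement list started at `p`. -/
def pvEnd (p : Int × Int) (ds : List (Int × Int)) : Int × Int :=
  ds.foldl (fun q d => (q.1 + d.1, q.2 + d.2)) p

lemma pvDelta_eq (c : Char) (x y : Int) :
    (if c = '^' then (x, y + 1)
     else if c = 'v' then (x, y - 1)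
     else if c = '<' then (x - 1, y)
     else if c = '>' then (x + 1, y)
     else (x, y))
    = (x + (pvDeltaB c).1, y + (pvDeltaB c).2) := by
  unfold pvDeltaB
  split_ifs <;> simp_all <;> omega

lemma pvPathFrom_append (d1 d2 : List (Int × Int)) (p : Int × Int) :
    pvPathFrom p (d1 ++ d2) = pvPathFrom p d1 ++ pvPathFrom (pvEnd p d1) d2 := by
  induction d1 generalizing p with
  | nil => simp [pvPathFrom, pvEnd]
  | cons d ds ih => simp [pvPathFrom, pvEnd, ih, pvEnd]

lemma pvPathFrom_shift (ds : List (Int × Int)) (p q : Int × Int) :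
    pvPathFrom (q.1 + p.1, q.2 + p.2) ds
      = (pvPathFrom p ds).map (fun r => (r.1 + q.1, r.2 + q.2)) := by
  induction ds generalizing p with
  | nil => simp [pvPathFrom]
  | cons d ds ih =>
    have htail := ih (p.1 + d.1, p.2 + d.2)
    simp only at htail
    simp only [pvPathFrom, List.map_cons]
    rw [show q.1 + p.1 + d.1 = q.1 + (p.1 + d.1) from by ring,
        show q.2 + p.2 + d.2 = q.2 + (p.2 + d.2) from by ring, htail]
    simp only [Prod.mk.injEq, List.cons.injEq, and_true]
    exact ⟨by ring, by ring⟩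

/-- `left[-1]` of a nonempty path is its endpoint. -/
lemma pvPathFrom_last (ds : List (Int × Int)) (p : Int × Int) (h : ds ≠ []) :
    PySem.List.pyGetD (pvPathFrom p ds) (-1) (0, 0) = pvEnd p ds := by
  induction ds generalizing p with
  | nil => exact absurd rfl h
  | cons d ds ih =>
    cases ds with
    | nil =>
      simp [pvPathFrom, pvEnd, PySem.List.pyGetD, PySem.List.pyGet?, PySem.List.pyIdx?]
    | cons e es =>
      have := ih (h := by simp) (p := (p.1 + d.1, p.2 + d.2))
      simp only [pvPathFrom, pvEnd, List.foldl_cons] at this ⊢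
      rw [← this]
      simp [PySem.List.pyGetD, PySem.List.pyGet?, PySem.List.pyIdx?]
      rfl

/-- B's divide-and-conquer equals the straight-line path of the mapped deltas. -/
lemma pvRelB_correct : ∀ (n : Nat) (l : List Char), l.length = n →
    pvRelB l = pvPathFrom (0, 0) (l.map pvDeltaB) := by
  intro n
  induction n using Nat.strong_induction_on with
  | _ n ih =>
    intro l hl
    rw [pvRelB]
    by_cases h0 : l.length = 0
    · cases l with
      | nil => simp [pvPathFrom]
      | cons c cs => simp at h0
    · by_cases h1 : l.length = 1
      · match l, h1 with
        | [c], _ => simp [pvPathFrom]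
      · simp only [h0, h1, if_false]
        have hlen : 2 ≤ l.length := by omega
        have hmid : 1 ≤ l.length / 2 ∧ l.length / 2 < l.length := by omega
        have htake : (l.take (l.length / 2)).length = l.length / 2 := by
          simp; omega
        have hdrop : (l.drop (l.length / 2)).length = l.length - l.length / 2 := by simp
        have hL := ih (l.length / 2) (by omega) (l.take (l.length / 2)) (by omega)
        have hR := ih (l.length - l.length / 2) (by omega) (l.drop (l.length / 2)) hdrop
        rw [hL, hR]
        have htne : (l.take (l.length / 2)).map pvDeltaB ≠ [] := by
          intro hnil
          have := congrArg List.length hnil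
          simp only [List.length_map, List.length_nil, htake] at this
          omega
        rw [pvPathFrom_last _ _ htne]
        have hsplit : l.map pvDeltaB
            = (l.take (l.length / 2)).map pvDeltaB ++ (l.drop (l.length / 2)).map pvDeltaB := by
          rw [← List.map_append, List.take_append_drop]
        rw [hsplit, pvPathFrom_append]
        set e := pvEnd (0, 0) ((l.take (l.length / 2)).map pvDeltaB) with he
        have := pvPathFrom_shift ((l.drop (l.length / 2)).map pvDeltaB) (0, 0) e
        simpa using this.symm

/-- A's loop from state (s, p) updates the set with the remaining path. -/
lemma pvApath (l : List Char) (s : PySem.Set (Int × Int)) (p : Int × Int) :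
    (l.foldl
      (fun (st : PySem.Set (Int × Int) × Int × Int) i =>
        let x := st.2.1
        let y := st.2.2
        let xy : Int × Int :=
          if i = '^' then (x, y + 1)
          else if i = 'v' then (x, y - 1)
          else if i = '<' then (x - 1, y)
          else if i = '>' then (x + 1, y)
          else (x, y)
        (PySem.Set.add st.1 xy, xy))
      (s, p)).1
    = PySem.Set.update s (pvPathFrom p (l.map pvDeltaB)) := by
  induction l generalizing s p with
  | nil => simp [pvPathFrom, PySem.Set.update]
  | cons c cs ih =>
    simp only [List.foldl_cons, List.map_cons]
    rw [pvDelta_eq c p.1 p.2]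
    rw [ih]
    rfl

-- ===== VERDICT (by name: the statement is the Claim_ definition above) =====
theorem houses_spec : Claim_equal_houses := by
  intro instructions _
  show houses instructions = houses_alt instructions
  unfold houses houses_alt
  rw [pvApath, pvRelB_correct instructions.toList.length instructions.toList rfl]
  rfl
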